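-- pv_equiv track=rewrite | github.com/christopheprudent/python-exercices | list/e209_list_groups_non-zero_items.py | groups_non_value_items
-- ===== SOURCE A (Python) =====
-- def groups_non_value_items(l, value):
--     _n = 0
--     _groups = []
--     for i, x in enumerate(l):
--         if x == value:
--             if _n > 0:
--                 _groups.append((i-_n,i))
--                 _n = 0
--         else:
--             _n += 1
--
--     if _n > 0:
--         i += 1
--         _groups.append((i-_n,i))
--     return _groups
-- ===== SOURCE B (Python) =====
-- def groups_non_value_items(l, value):
--     # groupby-style: split l into maximal runs of equal key (x == value),
--     # emit (start, end) offsets for the non-value runs.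
--     res = []
--     i = 0
--     rest = l
--     while rest:
--         key = rest[0] == value
--         j = 1
--         while j < len(rest) and (rest[j] == value) == key:
--             j += 1
--         if not key:
--             res.append((i, i + j))
--         i += j
--         rest = rest[j:]
--     return res
-- ===== Notes on version B (the rewrite author's own statement) =====
-- stated objective: alternative
-- what changed: Replaces A's per-element counter loop (run length carried across iterations, flushed on a value hit and after the loop) with a groupby-style pass that splits the list into maximal same-key runs and emits one (start, start+len) pair per non-value run, so there is no carried counter and no post-loop flush.
import Mathlib
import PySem

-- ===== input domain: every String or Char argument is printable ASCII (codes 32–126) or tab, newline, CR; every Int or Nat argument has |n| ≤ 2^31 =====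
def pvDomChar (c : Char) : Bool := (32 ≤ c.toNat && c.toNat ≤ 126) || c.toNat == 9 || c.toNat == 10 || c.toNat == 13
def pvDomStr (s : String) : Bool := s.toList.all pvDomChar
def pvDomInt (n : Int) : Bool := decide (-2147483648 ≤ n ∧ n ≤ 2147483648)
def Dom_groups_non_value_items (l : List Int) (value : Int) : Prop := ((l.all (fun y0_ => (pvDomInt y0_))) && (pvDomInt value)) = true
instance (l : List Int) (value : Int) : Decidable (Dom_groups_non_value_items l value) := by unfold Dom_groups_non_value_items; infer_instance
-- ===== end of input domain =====

-- B replaces A's carried run-counter (flushed on a value hit and once after the loop)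
-- by a groupby-style pass over maximal same-key runs; objective: alternative decomposition.

-- ===== PORT A =====
-- A's loop body: the state carries (i, _n, _groups); enumerate's i is carried explicitly.
def pvStepA (value : Int) (st : Int × Int × List (Int × Int)) (x : Int) :
    Int × Int × List (Int × Int) :=
  let i := st.1; let n := st.2.1; let gs := st.2.2
  if x == value then
    if n > 0 then (i + 1, 0, gs ++ [(i - n, i)]) else (i + 1, n, gs)
  else (i + 1, n + 1, gs)

-- A's code after the loop: the final flush (the carried i equals Python's i+1 = len l there).
def pvFinA (st : Int × Int × List (Int × Int)) : List (Int × Int) :=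
  if st.2.1 > 0 then st.2.2 ++ [(st.1 - st.2.1, st.1)] else st.2.2

def groups_non_value_items (l : List Int) (value : Int) : List (Int × Int) :=
  pvFinA (l.foldl (pvStepA value) (0, 0, []))

-- ===== PORT B =====
-- B's outer while loop: one step per maximal run. The inner while counts j, the run
-- length; the head of the run always has its own key, so j = 1 + |takeWhile same-key tail|,
-- and rest[j:] = dropWhile same-key tail.
def pvAltGo (value : Int) : List Int → Int → List (Int × Int)
  | [], _ => []
  | x :: xs, i =>
    let p := fun y => ((y == value) == (x == value))
    let j : Int := 1 + (xs.takeWhile p).length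
    let rest := xs.dropWhile p
    if x == value then pvAltGo value rest (i + j)
    else (i, i + j) :: pvAltGo value rest (i + j)
  termination_by l => l.length
  decreasing_by all_goals
    exact Nat.lt_succ_of_le (List.length_dropWhile_le ..)

def groups_non_value_items_alt (l : List Int) (value : Int) : List (Int × Int) :=
  pvAltGo value l 0

-- ===== PRECONDITION & SPEC =====
def Spec_groups_non_value_items (l : List Int) (value : Int) (out : List (Int × Int)) : Prop := out = groups_non_value_items_alt l value
instance (l : List Int) (value : Int) (out : List (Int × Int)) : Decidable (Spec_groups_non_value_items l value out) := by unfold Spec_groups_non_value_items; infer_instance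

-- ===== CLAIM (what is proved, stated in full; the proofs are below) =====
def Claim_equal_groups_non_value_items : Prop := ∀ (l : List Int) (value : Int), Dom_groups_non_value_items l value → Spec_groups_non_value_items l value (groups_non_value_items l value)

-- ===== LEMMAS AND PROOFS =====

-- Reference function: A's remaining loop + final flush, from index i with carried count n.
def pvF (value : Int) : List Int → Int → Int → List (Int × Int)
  | [], i, n => if n > 0 then [(i - n, i)] else []
  | x :: xs, i, n =>
    if x == value then
      if n > 0 then (i - n, i) :: pvF value xs (i + 1) 0 else pvF value xs (i + 1) n
    else pvF value xs (i + 1) (n + 1)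

theorem pvA_loop (value : Int) (l : List Int) :
    ∀ (i n : Int) (gs : List (Int × Int)),
    pvFinA (l.foldl (pvStepA value) (i, n, gs)) = gs ++ pvF value l i n := by
  induction l with
  | nil =>
    intro i n gs
    simp only [List.foldl_nil, pvF, pvFinA]
    split <;> simp
  | cons x xs ih =>
    intro i n gs
    rw [List.foldl_cons]
    simp only [pvStepA, pvF]
    by_cases hx : x == value
    · by_cases hn : n > 0
      · simp only [hx, hn, if_true]
        rw [ih (i + 1) 0 (gs ++ [(i - n, i)])]
        simp
      · simp only [hx, hn, if_true, if_false]
        rw [ih (i + 1) n gs]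
    · simp only [hx, if_false, Bool.false_eq_true]
      rw [ih (i + 1) (n + 1) gs]

-- consuming a run of value-elements with count 0 just advances the index
theorem pvF_skip_values (value : Int) (run : List Int)
    (h : ∀ y ∈ run, y = value) :
    ∀ (rest : List Int) (i : Int),
    pvF value (run ++ rest) i 0 = pvF value rest (i + run.length) 0 := by
  induction run with
  | nil => intro rest i; simp
  | cons x xs ih =>
    intro rest i
    have hx : (x == value) = true := by simpa using h x (by simp)
    simp only [List.cons_append, pvF, hx, if_true]
    rw [if_neg (by omega : ¬ (0:Int) > 0)]
    rw [ih (fun y hy => h y (by simp [hy])) rest (i + 1)]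
    congr 1
    push_cast [List.length_cons]; ring

-- consuming a run of non-value elements just grows the count
theorem pvF_eat_nonvalues (value : Int) (run : List Int)
    (h : ∀ y ∈ run, y ≠ value) :
    ∀ (rest : List Int) (i n : Int),
    pvF value (run ++ rest) i n = pvF value rest (i + run.length) (n + run.length) := by
  induction run with
  | nil => intro rest i n; simp
  | cons x xs ih =>
    intro rest i n
    have hx : (x == value) = false := by simpa using h x (by simp)
    simp only [List.cons_append, pvF, hx, Bool.false_eq_true, if_false]
    rw [ih (fun y hy => h y (by simp [hy])) rest (i + 1) (n + 1)]
    congr 1 <;> (push_cast [List.length_cons]; ring)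

-- the head of a dropWhile fails the predicate
theorem pv_dropWhile_head (p : Int → Bool) : ∀ (l : List Int) (y : Int) (ys : List Int),
    l.dropWhile p = y :: ys → p y = false := by
  intro l
  induction l with
  | nil => simp [List.dropWhile]
  | cons a as ih =>
    intro y ys h
    by_cases hpa : p a
    · rw [List.dropWhile_cons_of_pos hpa] at h; exact ih y ys h
    · rw [List.dropWhile_cons_of_neg hpa] at h
      cases h; simpa using hpa

-- a positive carried count is flushed at the end of a non-value run
theorem pvF_flush (value : Int) (drop : List Int) (m L : Int)
    (hd : drop = [] ∨ ∃ y ys, drop = y :: ys ∧ y = value) (hL : L > 0) :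
    pvF value drop m L = (m - L, m) :: pvF value drop m 0 := by
  rcases hd with h | ⟨y, ys, h, hy⟩ <;> subst h
  · simp [pvF, hL]
  · subst hy
    simp [pvF, hL]

theorem pvB_eq_pvF (value : Int) : ∀ (l : List Int) (i : Int),
    pvAltGo value l i = pvF value l i 0 := by
  intro l i
  induction l, i using pvAltGo.induct value with
  | case1 i => simp [pvAltGo, pvF]
  | case2 x xs i p j rest hx ih =>
    rw [pvAltGo, if_pos hx]
    have hvals : ∀ y ∈ x :: List.takeWhile p xs, y = value := by
      intro y hy
      rcases List.mem_cons.mp hy with h1 | h1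
      · subst h1; exact beq_iff_eq.mp hx
      · have hp := List.mem_takeWhile_imp h1
        simp only [p, hx, beq_true] at hp
        exact beq_iff_eq.mp hp
    have hsplit : x :: xs = (x :: List.takeWhile p xs) ++ List.dropWhile p xs := by
      simp
    calc pvAltGo value (List.dropWhile p xs) (i + j)
        = pvF value (List.dropWhile p xs) (i + j) 0 := ih
      _ = pvF value (x :: xs) i 0 := by
          conv_rhs => rw [hsplit]
          rw [pvF_skip_values value _ hvals]
          congr 1
          simp only [j, List.length_cons]
          push_cast; ring
  | case3 x xs i p j rest hx ih =>
    rw [pvAltGo, if_neg hx]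
    have hnv : ∀ y ∈ x :: List.takeWhile p xs, y ≠ value := by
      intro y hy
      rcases List.mem_cons.mp hy with h1 | h1
      · subst h1; simpa using hx
      · have hp := List.mem_takeWhile_imp h1
        have h2 : (x == value) = false := by simpa using hx
        simp only [p, h2] at hp
        simpa using hp
    have hsplit : x :: xs = (x :: List.takeWhile p xs) ++ List.dropWhile p xs := by
      simp
    have hhead : List.dropWhile p xs = [] ∨
        ∃ y ys, List.dropWhile p xs = y :: ys ∧ y = value := by
      cases hdr : List.dropWhile p xs with
      | nil => exact Or.inl rfl
      | cons y ys =>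
        refine Or.inr ⟨y, ys, rfl, ?_⟩
        have hfalse := pv_dropWhile_head p xs y ys hdr
        have h2 : (x == value) = false := by simpa using hx
        by_contra hyv
        have h1 : (y == value) = false := by simpa using hyv
        rw [show p y = ((y == value) == (x == value)) from rfl, h1, h2] at hfalse
        simp at hfalse
    have hL : (0 : Int) + ((x :: List.takeWhile p xs).length : Int) > 0 := by
      simp only [List.length_cons]; push_cast; omega
    conv_rhs => rw [hsplit]
    rw [pvF_eat_nonvalues value _ hnv, pvF_flush value _ _ _ hhead hL]
    have hij : i + ((x :: List.takeWhile p xs).length : Int) = i + j := by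
      simp only [j, List.length_cons]; push_cast; ring
    rw [hij]
    refine congrArg₂ (· :: ·) ?_ ih
    simp only [p, j, List.length_cons, Prod.mk.injEq]
    push_cast
    exact ⟨by ring, trivial⟩

-- ===== VERDICT (by name: the statement is the Claim_ definition above) =====
theorem groups_non_value_items_spec : Claim_equal_groups_non_value_items := by
  intro l value _
  unfold Spec_groups_non_value_items groups_non_value_items groups_non_value_items_alt
  rw [pvB_eq_pvF, pvA_loop value l 0 0 []]
  simp
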